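-- pv_equiv track=rewrite | github.com/zhangqi94/watericeIh | analysis/anatools.py | _choose_rebin_block_size
-- ===== SOURCE A (Python) =====
-- def _choose_rebin_block_size(n_samples: int, min_blocks: int = 8) -> int:
--     """Choose a power-of-two block size so that n_blocks >= min_blocks."""
--     n = int(n_samples)
--     if n <= 0:
--         return 1
--     mb = int(min_blocks)
--     if mb < 1:
--         mb = 1
--     block = 1
--     while (n // (block * 2)) >= mb:
--         block *= 2
--     return block
-- ===== SOURCE B (Python) =====
-- def _choose_rebin_block_size(n_samples: int, min_blocks: int = 8) -> int:
--     """Choose a power-of-two block size so that n_blocks >= min_blocks."""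
--     n = int(n_samples)
--     if n <= 0:
--         return 1
--     mb = int(min_blocks)
--     if mb < 1:
--         mb = 1
--     q = n // mb          # largest allowed block: n // block >= mb  <=>  block <= q
--     if q < 1:
--         return 1
--     return 1 << (q.bit_length() - 1)
-- ===== Notes on version B (the rewrite author's own statement) =====
-- stated objective: faster
-- what changed: Replaces the doubling while-loop with closed-form bit arithmetic: q = n // mb, and the answer is 1 << (q.bit_length() - 1) (the largest power of two not exceeding q), keeping the same guards.
import Mathlib
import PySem

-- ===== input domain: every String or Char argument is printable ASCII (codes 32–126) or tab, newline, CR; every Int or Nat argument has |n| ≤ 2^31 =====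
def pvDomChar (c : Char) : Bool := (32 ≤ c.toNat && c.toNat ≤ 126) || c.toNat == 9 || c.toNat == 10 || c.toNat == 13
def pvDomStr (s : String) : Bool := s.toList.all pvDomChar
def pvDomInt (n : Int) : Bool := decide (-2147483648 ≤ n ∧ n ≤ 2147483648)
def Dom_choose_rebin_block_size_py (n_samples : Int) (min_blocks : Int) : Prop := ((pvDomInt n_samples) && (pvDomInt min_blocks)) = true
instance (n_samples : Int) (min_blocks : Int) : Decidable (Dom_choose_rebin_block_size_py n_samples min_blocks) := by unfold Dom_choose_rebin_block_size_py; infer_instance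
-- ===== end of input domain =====

-- B replaces A's doubling loop by closed-form bit-length arithmetic (same guards, same value).

-- ===== PORT A =====
-- the 'while (n // (block * 2)) >= mb: block *= 2' loop; the two proof arguments
-- (1 ≤ mb, 0 < block) are loop invariants carried only for termination
def chooseRebinLoopA (n mb block : Int) (hmb : 1 ≤ mb) (hb : 0 < block) : Int :=
  if h : mb ≤ PySem.Int.floordiv n (block * 2) then
    chooseRebinLoopA n mb (block * 2) hmb (by omega)
  else
    block
termination_by (n - block).toNat
decreasing_by
  have h2 : (0:Int) < block * 2 := by omega
  rw [PySem.Int.le_floordiv_iff_mul_le h2] at h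
  have hn : block * 2 ≤ n := by nlinarith
  omega

def choose_rebin_block_size_py (n_samples : Int) (min_blocks : Int) : Int :=
  if n_samples ≤ 0 then 1
  else
    chooseRebinLoopA n_samples (if min_blocks < 1 then 1 else min_blocks) 1
      (by split <;> omega) (by norm_num)

-- ===== PORT B =====
def choose_rebin_block_size_py_alt (n_samples : Int) (min_blocks : Int) : Int :=
  if n_samples ≤ 0 then 1
  else
    let mb : Int := if min_blocks < 1 then 1 else min_blocks
    let q : Int := PySem.Int.floordiv n_samples mb
    if q < 1 then 1
    else (2 : Int) ^ (PySem.Int.bitLength q - 1)   -- 1 << (q.bit_length() - 1)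

-- ===== PRECONDITION & SPEC =====
def Spec_choose_rebin_block_size_py (n_samples : Int) (min_blocks : Int) (out : Int) : Prop := out = choose_rebin_block_size_py_alt n_samples min_blocks
instance (n_samples : Int) (min_blocks : Int) (out : Int) : Decidable (Spec_choose_rebin_block_size_py n_samples min_blocks out) := by unfold Spec_choose_rebin_block_size_py; infer_instance

-- ===== CLAIM (what is proved, stated in full; the proofs are below) =====
def Claim_equal_choose_rebin_block_size_py : Prop := ∀ (n_samples : Int) (min_blocks : Int), Dom_choose_rebin_block_size_py n_samples min_blocks → Spec_choose_rebin_block_size_py n_samples min_blocks (choose_rebin_block_size_py n_samples min_blocks)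

-- ===== LEMMAS AND PROOFS =====

-- loop characterisation: started at any block b with 0 < b ≤ q := n // mb, the loop returns
-- b * 2^(bitLength (q // b) - 1), i.e. b times the largest power of two not exceeding q / b
lemma chooseRebinLoopA_eq (n mb : Int) (hmb : 1 ≤ mb) :
    ∀ (b : Int) (hb : 0 < b), b ≤ PySem.Int.floordiv n mb →
      chooseRebinLoopA n mb b hmb hb =
        b * 2 ^ (PySem.Int.bitLength
            (PySem.Int.floordiv (PySem.Int.floordiv n mb) b) - 1) := by
  intro b hb hbq
  set q := PySem.Int.floordiv n mb with hq
  have hqpos : 0 < q := lt_of_lt_of_le hb hbq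
  induction hk : (q - b).toNat using Nat.strong_induction_on generalizing b with
  | _ k ih =>
    rw [chooseRebinLoopA.eq_def]
    have hcond : (mb ≤ PySem.Int.floordiv n (b * 2)) ↔ (b * 2 ≤ q) := by
      rw [PySem.Int.le_floordiv_iff_mul_le (by omega : (0:Int) < b * 2),
          hq, PySem.Int.le_floordiv_iff_mul_le (by omega : (0:Int) < mb)]
      constructor <;> intro h <;> nlinarith
    by_cases h2b : b * 2 ≤ q
    · rw [dif_pos (hcond.mpr h2b)]
      rw [ih ((q - b * 2).toNat) (by omega) (b * 2) (by omega) h2b rfl]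
      have hsplit : PySem.Int.floordiv (PySem.Int.floordiv q b) 2
          = PySem.Int.floordiv q (b * 2) := by
        rw [PySem.Int.floordiv_eq_ediv_of_pos hb,
            PySem.Int.floordiv_eq_ediv_of_pos (by norm_num : (0:Int) < 2),
            PySem.Int.floordiv_eq_ediv_of_pos (by omega : (0:Int) < b * 2),
            Int.ediv_ediv_of_nonneg (by omega)]
      have hqb2 : (2:Int) ≤ PySem.Int.floordiv q b := by
        rw [PySem.Int.le_floordiv_iff_mul_le hb]; linarith
      have hbl : PySem.Int.bitLength (PySem.Int.floordiv q b)
          = PySem.Int.bitLength (PySem.Int.floordiv q (b * 2)) + 1 := by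
        rw [PySem.Int.bitLength_of_pos (by omega), hsplit]
      have hpos2 : (1:Int) ≤ PySem.Int.floordiv q (b * 2) := by
        rw [PySem.Int.le_floordiv_iff_mul_le (by omega : (0:Int) < b * 2)]; linarith
      have hble : 1 ≤ PySem.Int.bitLength (PySem.Int.floordiv q (b * 2)) := by
        by_contra h'
        have h0 : PySem.Int.bitLength (PySem.Int.floordiv q (b * 2)) = 0 := by omega
        have hlt := PySem.Int.lt_two_pow_bitLength (PySem.Int.floordiv q (b * 2))
        rw [h0] at hlt
        simp at hlt
        omega
      rw [hbl, Nat.add_sub_cancel]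
      obtain ⟨k', hk'⟩ : ∃ k', PySem.Int.bitLength (PySem.Int.floordiv q (b * 2)) = k' + 1 :=
        ⟨_, (Nat.succ_pred_eq_of_pos hble).symm⟩
      rw [hk']
      simp [pow_succ]
      ring
    · rw [dif_neg (fun hc => h2b (hcond.mp hc))]
      have h1 : PySem.Int.floordiv q b = 1 := by
        rw [PySem.Int.floordiv_eq_iff_of_pos hb]; constructor <;> linarith
      rw [h1]
      have : PySem.Int.bitLength (1 : Int) = 1 := by decide
      rw [this]
      simp

-- ===== VERDICT (by name: the statement is the Claim_ definition above) =====
theorem choose_rebin_block_size_py_spec : Claim_equal_choose_rebin_block_size_py := by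
  intro n mb _
  unfold Spec_choose_rebin_block_size_py choose_rebin_block_size_py choose_rebin_block_size_py_alt
  by_cases hn : n ≤ 0
  · simp [hn]
  · rw [if_neg hn, if_neg hn]
    set mb' : Int := if mb < 1 then 1 else mb with hmb'
    have hmb1 : (1:Int) ≤ mb' := by rw [hmb']; split <;> omega
    set q : Int := PySem.Int.floordiv n mb' with hq
    by_cases hq1 : q < 1
    · rw [if_pos hq1]
      rw [chooseRebinLoopA.eq_def]
      have hnm : n < mb' := by
        by_contra h
        have : (1:Int) ≤ q := by
          rw [hq, PySem.Int.le_floordiv_iff_mul_le (by omega : (0:Int) < mb')]; omega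
        omega
      have : ¬ (mb' ≤ PySem.Int.floordiv n (1 * 2)) := by
        rw [PySem.Int.le_floordiv_iff_mul_le (by norm_num : (0:Int) < 1 * 2)]
        nlinarith
      rw [dif_neg this]
    · rw [if_neg hq1]
      rw [chooseRebinLoopA_eq n mb' hmb1 1 (by norm_num) (by rw [← hq]; omega)]
      rw [← hq]
      have hdiv1 : PySem.Int.floordiv q 1 = q := by
        rw [PySem.Int.floordiv_eq_ediv_of_pos (by norm_num : (0:Int) < 1), Int.ediv_one]
      rw [hdiv1, one_mul]
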